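-- pv_equiv track=rewrite | github.com/gl00my/iing | api/web.py | sort_files
-- ===== SOURCE A (Python) =====
-- def sort_files(files):
--     filelist = []
--     for f in sorted(files):
--         if f[0].endswith("/") and not f in filelist:
--             filelist.append(f)
--     for f in sorted(files):
--         if not f in filelist:
--             filelist.append(f)
--     return filelist
-- ===== SOURCE B (Python) =====
-- def sort_files(files):
--     dirs = []
--     others = []
--     for f in sorted(files):
--         target = dirs if f[0].endswith("/") else others
--         if f not in target:
--             target.append(f)
--     return dirs + others
-- ===== Notes on version B (the rewrite author's own statement) =====
-- stated objective: alternative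
-- what changed: A's two sequential scans over sorted(files) (dirs first, then everything else) are replaced by a single partitioning pass that maintains separate dirs/others lists with per-list membership dedup and concatenates them.
import Mathlib
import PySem

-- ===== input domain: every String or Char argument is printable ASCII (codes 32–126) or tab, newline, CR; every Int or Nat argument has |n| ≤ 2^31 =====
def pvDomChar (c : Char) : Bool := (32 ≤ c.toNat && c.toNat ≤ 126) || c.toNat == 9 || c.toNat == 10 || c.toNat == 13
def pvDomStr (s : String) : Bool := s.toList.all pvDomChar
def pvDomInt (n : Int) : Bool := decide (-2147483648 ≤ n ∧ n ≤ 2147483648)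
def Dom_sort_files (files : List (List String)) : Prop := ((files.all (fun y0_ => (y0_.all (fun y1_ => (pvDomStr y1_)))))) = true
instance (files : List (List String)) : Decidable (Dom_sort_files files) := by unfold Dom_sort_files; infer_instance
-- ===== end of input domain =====

-- B replaces A's two sequential scans over sorted(files) by a single partitioning
-- pass keeping separate dirs/others lists; equivalence of the return values is proved.

-- f[0].endswith("/"); Pre_ guarantees f ≠ [], where headD "" is exact for f[0]
def pvIsDir (f : List String) : Bool := PySem.Str.endswith (f.headD "") "/"

-- ===== PORT A =====
def sort_files (files : List (List String)) : List (List String) :=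
  let s := PySem.List.sorted files (fun x => x) false
  let filelist := s.foldl
    (fun filelist f => if pvIsDir f = true ∧ f ∉ filelist then filelist ++ [f] else filelist) []
  s.foldl (fun filelist f => if f ∉ filelist then filelist ++ [f] else filelist) filelist

-- ===== PORT B =====
def sort_files_alt (files : List (List String)) : List (List String) :=
  let p := (PySem.List.sorted files (fun x => x) false).foldl
    (fun (st : List (List String) × List (List String)) f =>
      if pvIsDir f = true then
        (if f ∈ st.1 then st.1 else st.1 ++ [f], st.2)
      else
        (st.1, if f ∈ st.2 then st.2 else st.2 ++ [f]))
    ([], [])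
  p.1 ++ p.2

-- ===== PRECONDITION & SPEC =====
-- Pre_ excludes inputs containing an empty inner list, on which Python A raises IndexError (f[0]).
def Pre_sort_files (files : List (List String)) : Prop := ∀ f ∈ files, f ≠ []
instance (files : List (List String)) : Decidable (Pre_sort_files files) := by unfold Pre_sort_files; infer_instance
def pvWitness_sort_files : List (List String) := [["b"], ["a/"], ["b"]]
def Spec_sort_files (files : List (List String)) (out : List (List String)) : Prop := out = sort_files_alt files
instance (files : List (List String)) (out : List (List String)) : Decidable (Spec_sort_files files out) := by unfold Spec_sort_files; infer_instance

-- ===== CLAIM (what is proved, stated in full; the proofs are below) =====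
def Claim_equal_sort_files : Prop := ∀ (files : List (List String)), Dom_sort_files files → Pre_sort_files files → Spec_sort_files files (sort_files files)

-- ===== LEMMAS AND PROOFS =====

-- A's loop 1 / loop 2 and B's others-loop, named for the lemmas
def pvL1 (d : List (List String)) (s : List (List String)) : List (List String) :=
  s.foldl (fun fl f => if pvIsDir f = true ∧ f ∉ fl then fl ++ [f] else fl) d
def pvL2 (d : List (List String)) (s : List (List String)) : List (List String) :=
  s.foldl (fun fl f => if f ∉ fl then fl ++ [f] else fl) d
def pvLo (o : List (List String)) (s : List (List String)) : List (List String) :=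
  s.foldl (fun o f => if pvIsDir f = true then o else if f ∈ o then o else o ++ [f]) o

lemma pvL1_mono (s : List (List String)) : ∀ d x, x ∈ d → x ∈ pvL1 d s := by
  induction s with
  | nil => intro d x hx; simpa [pvL1] using hx
  | cons f s ih =>
    intro d x hx
    simp only [pvL1, List.foldl_cons]
    by_cases h : pvIsDir f = true ∧ f ∉ d
    · simp only [if_pos h]; exact ih _ _ (by simp [hx])
    · simp only [if_neg h]; exact ih _ _ hx

lemma pvL1_complete (s : List (List String)) :
    ∀ d f, f ∈ s → pvIsDir f = true → f ∈ pvL1 d s := by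
  induction s with
  | nil => intro d f hf; simp at hf
  | cons g s ih =>
    intro d f hf hd
    rcases List.mem_cons.mp hf with rfl | hf
    · simp only [pvL1, List.foldl_cons]
      by_cases h : pvIsDir f = true ∧ f ∉ d
      · simp only [if_pos h]; exact pvL1_mono s _ _ (by simp)
      · have : f ∈ d := by
          by_contra hc; exact h ⟨hd, hc⟩
        simp only [if_neg h]; exact pvL1_mono s _ _ this
    · simp only [pvL1, List.foldl_cons]
      split <;> exact ih _ _ hf hd

lemma pvL1_dirs (s : List (List String)) :
    ∀ d, (∀ x ∈ d, pvIsDir x = true) → ∀ x ∈ pvL1 d s, pvIsDir x = true := by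
  induction s with
  | nil => intro d hd; simpa [pvL1] using hd
  | cons f s ih =>
    intro d hd
    simp only [pvL1, List.foldl_cons]
    by_cases h : pvIsDir f = true ∧ f ∉ d
    · simp only [if_pos h]
      apply ih
      intro x hx
      rcases List.mem_append.mp hx with hx | hx
      · exact hd x hx
      · simp only [List.mem_singleton] at hx; subst hx; exact h.1
    · simp only [if_neg h]; exact ih _ hd

-- A's second loop over d ++ o, when d already holds every dir of s and only dirs,
-- appends exactly what B's others-loop appends.
lemma pvL2_split (s : List (List String)) :
    ∀ o d, (∀ f ∈ s, pvIsDir f = true → f ∈ d) → (∀ x ∈ d, pvIsDir x = true) →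
    pvL2 (d ++ o) s = d ++ pvLo o s := by
  induction s with
  | nil => intro o d _ _; simp [pvL2, pvLo]
  | cons f s ih =>
    intro o d h1 h2
    simp only [pvL2, pvLo, List.foldl_cons]
    by_cases hd : pvIsDir f = true
    · have hfd : f ∈ d := h1 f (by simp) hd
      have : ¬ f ∉ (d ++ o) := by simp [hfd]
      simp only [if_neg this, if_pos hd]
      exact ih o d (fun g hg => h1 g (by simp [hg])) h2
    · have hfd : f ∉ d := fun hc => hd (h2 f hc)
      simp only [if_neg hd]
      by_cases ho : f ∈ o
      · have : ¬ f ∉ (d ++ o) := by simp [ho]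
        simp only [if_neg this, if_pos ho]
        exact ih o d (fun g hg => h1 g (by simp [hg])) h2
      · have : f ∉ (d ++ o) := by simp [hfd, ho]
        simp only [if_pos this, if_neg ho, List.append_assoc]
        exact ih (o ++ [f]) d (fun g hg => h1 g (by simp [hg])) h2

-- B's pair fold computes (pvL1 [] s, pvLo [] s) componentwise.
lemma pvB_split (s : List (List String)) :
    ∀ d o, s.foldl
      (fun (st : List (List String) × List (List String)) f =>
        if pvIsDir f = true then
          (if f ∈ st.1 then st.1 else st.1 ++ [f], st.2)
        else
          (st.1, if f ∈ st.2 then st.2 else st.2 ++ [f])) (d, o)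
      = (pvL1 d s, pvLo o s) := by
  induction s with
  | nil => intro d o; simp [pvL1, pvLo]
  | cons f s ih =>
    intro d o
    simp only [List.foldl_cons, pvL1, pvLo]
    by_cases hd : pvIsDir f = true
    · by_cases hm : f ∈ d
      · have : ¬ (pvIsDir f = true ∧ f ∉ d) := fun h => h.2 hm
        simpa [hd, hm, if_neg this, pvL1, pvLo] using ih d o
      · have : pvIsDir f = true ∧ f ∉ d := ⟨hd, hm⟩
        simpa [hd, hm, if_pos this, pvL1, pvLo] using ih (d ++ [f]) o
    · have : ¬ (pvIsDir f = true ∧ f ∉ d) := fun h => hd h.1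
      by_cases hm : f ∈ o
      · simpa [hd, hm, if_neg this, pvL1, pvLo] using ih d o
      · simpa [hd, hm, if_neg this, pvL1, pvLo] using ih d (o ++ [f])

-- ===== VERDICT (by name: the statement is the Claim_ definition above) =====
theorem sort_files_spec : Claim_equal_sort_files := by
  intro files _ _
  unfold Spec_sort_files sort_files sort_files_alt
  set s := PySem.List.sorted files (fun x => x) false with hs
  show pvL2 (pvL1 [] s) s = (s.foldl _ ([], [])).1 ++ (s.foldl _ ([], [])).2
  rw [pvB_split s [] []]
  have h1 : ∀ f ∈ s, pvIsDir f = true → f ∈ pvL1 [] s := fun f hf hd => pvL1_complete s [] f hf hd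
  have h2 : ∀ x ∈ pvL1 [] s, pvIsDir x = true := pvL1_dirs s [] (by simp)
  have := pvL2_split s [] (pvL1 [] s) h1 h2
  simpa using this
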